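-- pv_equiv track=rewrite | github.com/Br-quinones/Exercises | exercise_010.py | browser
-- ===== SOURCE A (Python) =====
-- contactos = [
--     {"nombre": "Ana Lopez",
--     "telefono": "987654321",
--     "email": "ana.lopez@example.com"},
--
--     {"nombre": "Juan Martinez",
--     "telefono": "123456789",
--     "email": "juan.martinez@example.com"},
--
--     {"nombre": "Maria Garcia",
--     "telefono": "555444333",
--     "email": "maria.garcia@example.com"},
--
--     {"nombre": "Carlos Rodriguez",
--     "telefono": "111222333",
--     "email": "carlos.r@example.com"},
--
--     {"nombre": "Mariana Sanchez",
--     "telefono": "999888777",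
--     "email": "mariana.s@example.com"},
-- ]
--
-- def browser(word):
--     position = 0
--     word = str(word).lower().lstrip().rstrip()
--     list_of_keys= ["nombre" , "telefono" , "email"]
--     list_of_results = []
--
--     for dictionary_lists in contactos:
--         for key in list_of_keys:
--             if word in contactos[position][key].lower():
--                 list_of_results.append(contactos[position])
--         position += 1
--
--     list_of_values = []
--     position = 0
--
--     for y in list_of_results:
--         diccionario = dict(list_of_results[position])
--         for x in diccionario.values():
--             list_of_values.append(x)
--         position += 1
--
--     final_list = []
--
--     for x in list_of_values:
--         if x not in final_list:
--             final_list.append(x)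
--
--     return final_list
-- ===== SOURCE B (Python) =====
-- contactos = [
--     {"nombre": "Ana Lopez",
--     "telefono": "987654321",
--     "email": "ana.lopez@example.com"},
--
--     {"nombre": "Juan Martinez",
--     "telefono": "123456789",
--     "email": "juan.martinez@example.com"},
--
--     {"nombre": "Maria Garcia",
--     "telefono": "555444333",
--     "email": "maria.garcia@example.com"},
--
--     {"nombre": "Carlos Rodriguez",
--     "telefono": "111222333",
--     "email": "carlos.r@example.com"},
--
--     {"nombre": "Mariana Sanchez",
--     "telefono": "999888777",
--     "email": "mariana.s@example.com"},
-- ]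
--
-- def browser(word):
--     word = str(word).lower().strip()
--     seen = []
--     for contacto in contactos:
--         if any(word in value.lower() for value in contacto.values()):
--             for value in contacto.values():
--                 if value not in seen:
--                     seen.append(value)
--     return seen
-- ===== Notes on version B (the rewrite author's own statement) =====
-- stated objective: simpler
-- what changed: A's three sequential passes (collect matching contacts with multiplicity via an index counter, flatten all their values into an intermediate list, then globally dedupe) are fused into one direct pass: each contact is tested once with any() and its values are appended straight into the deduped result, with no position counter and no intermediate lists.
import Mathlib
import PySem

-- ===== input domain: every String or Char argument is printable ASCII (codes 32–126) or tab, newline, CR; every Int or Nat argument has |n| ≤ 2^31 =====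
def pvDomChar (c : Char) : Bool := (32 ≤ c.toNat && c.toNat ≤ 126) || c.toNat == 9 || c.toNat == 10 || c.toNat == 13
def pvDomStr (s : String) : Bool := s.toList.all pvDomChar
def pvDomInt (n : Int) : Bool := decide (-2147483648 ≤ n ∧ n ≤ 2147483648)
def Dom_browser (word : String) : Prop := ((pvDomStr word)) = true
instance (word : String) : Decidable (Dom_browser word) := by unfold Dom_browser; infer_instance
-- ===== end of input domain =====

-- B fuses A's three sequential passes (index-counted match collection, value flattening, global dedupe)
-- into one direct pass over the contacts; objective: simpler, same cost.

-- ===== PORT A =====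
-- the fixed module-level contact list (dicts in insertion order)
def contactos : List (PySem.Dict String String) :=
  [ PySem.Dict.mk [("nombre", "Ana Lopez"), ("telefono", "987654321"), ("email", "ana.lopez@example.com")],
    PySem.Dict.mk [("nombre", "Juan Martinez"), ("telefono", "123456789"), ("email", "juan.martinez@example.com")],
    PySem.Dict.mk [("nombre", "Maria Garcia"), ("telefono", "555444333"), ("email", "maria.garcia@example.com")],
    PySem.Dict.mk [("nombre", "Carlos Rodriguez"), ("telefono", "111222333"), ("email", "carlos.r@example.com")],
    PySem.Dict.mk [("nombre", "Mariana Sanchez"), ("telefono", "999888777"), ("email", "mariana.s@example.com")] ]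

-- A, loop for loop: first loop collects matching contacts through the `position` counter
-- (contactos[position] via pyGet?, always in range here, and c[key] via getD — every contact
-- carries all three keys, so Python's KeyError path is unreachable); second loop flattens the
-- values, again through a position counter; third loop dedupes.
def browser (word : String) : List String :=
  let w := PySem.Str.rstrip (PySem.Str.lstrip (PySem.Str.lower word))
  let listOfKeys : List String := ["nombre", "telefono", "email"]
  let st1 : List (PySem.Dict String String) × Int :=
    contactos.foldl (fun st _dl =>
      (listOfKeys.foldl (fun r key =>
          if PySem.Str.isIn w (PySem.Str.lower
              (((PySem.List.pyGet? contactos st.2).getD (PySem.Dict.mk [])).getD key "")) then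
            r ++ [(PySem.List.pyGet? contactos st.2).getD (PySem.Dict.mk [])]
          else r) st.1,
       st.2 + 1)) ([], 0)
  let listOfResults := st1.1
  let st2 : List String × Int :=
    listOfResults.foldl (fun st _y =>
      (((PySem.List.pyGet? listOfResults st.2).getD (PySem.Dict.mk [])).values.foldl
          (fun a x => a ++ [x]) st.1,
       st.2 + 1)) ([], 0)
  let listOfValues := st2.1
  listOfValues.foldl (fun f x => if x ∈ f then f else f ++ [x]) []

-- ===== PORT B =====
def browser_alt (word : String) : List String :=
  let w := PySem.Str.strip (PySem.Str.lower word)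
  contactos.foldl (fun seen c =>
    if c.values.any (fun v => PySem.Str.isIn w (PySem.Str.lower v)) then
      c.values.foldl (fun seen v => if v ∈ seen then seen else seen ++ [v]) seen
    else seen) []

-- ===== PRECONDITION & SPEC =====
def Spec_browser (word : String) (out : List String) : Prop := out = browser_alt word
instance (word : String) (out : List String) : Decidable (Spec_browser word out) := by unfold Spec_browser; infer_instance

-- ===== CLAIM (what is proved, stated in full; the proofs are below) =====
def Claim_equal_browser : Prop := ∀ (word : String), Dom_browser word → Spec_browser word (browser word)

-- ===== LEMMAS AND PROOFS =====

-- .lstrip().rstrip() (A) and .strip() (B) agree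
lemma strip_eq_lstrip_rstrip (s : String) :
    PySem.Str.strip s = PySem.Str.rstrip (PySem.Str.lstrip s) := by
  simp [PySem.Str.strip, PySem.Str.rstrip, PySem.Str.lstrip, PySem.Chars.strip,
        PySem.Chars.rstrip, PySem.Chars.lstrip]

-- a position-counter loop that reads full[position] is the plain fold over the list
lemma foldl_enum {α β : Type} (g : β → α → β) (d : α) (full : List α) :
    ∀ (suf pre : List α) (acc : β), full = pre ++ suf →
    suf.foldl (fun (st : β × Int) (_ : α) =>
        (g st.1 ((PySem.List.pyGet? full st.2).getD d), st.2 + 1)) (acc, (pre.length : Int))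
      = (suf.foldl g acc, (full.length : Int)) := by
  intro suf
  induction suf with
  | nil => intro pre acc h; subst h; simp
  | cons y ys ih =>
      intro pre acc h
      have hget : PySem.List.pyGet? full (pre.length : Int) = some y := by
        rw [h]; exact PySem.List.pyGet?_append_length pre ys y
      have hlen : (pre.length : Int) + 1 = ((pre ++ [y]).length : Int) := by
        simp
      simp only [List.foldl_cons, hget, Option.getD_some, hlen]
      exact ih (pre ++ [y]) (g acc y) (by simp [h])

lemma foldl_enum0 {α β : Type} (g : β → α → β) (d : α) (full : List α) (acc : β) :
    full.foldl (fun (st : β × Int) (_ : α) =>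
        (g st.1 ((PySem.List.pyGet? full st.2).getD d), st.2 + 1)) (acc, 0)
      = (full.foldl g acc, (full.length : Int)) := by
  have := foldl_enum g d full full [] acc rfl
  simpa using this

-- the dedupe fold
def dd (acc l : List String) : List String :=
  l.foldl (fun f x => if x ∈ f then f else f ++ [x]) acc

lemma dd_append (acc l₁ l₂ : List String) : dd acc (l₁ ++ l₂) = dd (dd acc l₁) l₂ := by
  simp [dd, List.foldl_append]

lemma dd_fresh : ∀ (c acc : List String), c.Nodup → (∀ v ∈ c, v ∉ acc) → dd acc c = acc ++ c := by
  intro c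
  induction c with
  | nil => simp [dd]
  | cons x xs ih =>
      intro acc hnd hdisj
      have hx : x ∉ acc := hdisj x (by simp)
      have : dd acc (x :: xs) = dd (acc ++ [x]) xs := by simp [dd, hx]
      rw [this, ih (acc ++ [x]) hnd.of_cons]
      · simp
      · intro v hv
        simp only [List.mem_append, List.mem_singleton]
        rintro (h | rfl)
        · exact hdisj v (by simp [hv]) h
        · exact (List.nodup_cons.mp hnd).1 hv

lemma dd_stale : ∀ (c acc : List String), (∀ v ∈ c, v ∈ acc) → dd acc c = acc := by
  intro c
  induction c with
  | nil => simp [dd]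
  | cons x xs ih =>
      intro acc hmem
      have hx : x ∈ acc := hmem x (by simp)
      have : dd acc (x :: xs) = dd acc xs := by simp [dd, hx]
      rw [this, ih acc (fun v hv => hmem v (by simp [hv]))]

lemma dd_rep_stale : ∀ (k : Nat) (c acc : List String), (∀ v ∈ c, v ∈ acc) →
    dd acc (List.replicate k c).flatten = acc := by
  intro k
  induction k with
  | zero => intro c acc _; simp [dd]
  | succ j ih =>
      intro c acc hmem
      have : (List.replicate (j + 1) c).flatten = c ++ (List.replicate j c).flatten := by
        simp [List.replicate_succ]
      rw [this, dd_append, dd_stale c acc hmem, ih c acc hmem]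

-- the heart: dedupe-after-flatten-with-multiplicity = fused single pass
lemma main_dd (p : String → Bool) :
    ∀ (cs : List (List String)) (acc : List String), (acc ++ cs.flatten).Nodup →
    dd acc (cs.flatMap (fun c => (List.replicate ((c.filter p).length) c).flatten))
      = cs.foldl (fun seen c => if c.any p then dd seen c else seen) acc := by
  intro cs
  induction cs with
  | nil => intro acc _; simp [dd]
  | cons c cs ih =>
      intro acc hnd
      have hnd' : (acc ++ (c ++ cs.flatten)).Nodup := by simpa using hnd
      have hcnd : c.Nodup := by
        simp [List.nodup_append] at hnd'; tauto
      have hdisj : ∀ v ∈ c, v ∉ acc := by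
        simp only [List.nodup_append] at hnd'
        intro v hv hvacc
        exact hnd'.2.2 v hvacc v (List.mem_append.mpr (Or.inl hv)) rfl
      rw [List.flatMap_cons, dd_append]
      cases hany : c.any p with
      | false =>
          have hfil : c.filter p = [] := by
            simp only [List.filter_eq_nil_iff]
            intro a ha
            have := (List.any_eq_false).mp hany a ha
            simpa using this
          have hIH : (acc ++ cs.flatten).Nodup := by
            refine List.Nodup.sublist ?_ hnd'
            exact (List.sublist_append_right c cs.flatten).append_left acc
          rw [hfil]
          simp only [List.length_nil, List.replicate_zero, List.flatten_nil]
          rw [show dd acc [] = acc from rfl, ih acc hIH, List.foldl_cons]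
          simp only [hany, Bool.false_eq_true, if_false]
      | true =>
          obtain ⟨a, ha, hpa⟩ := List.any_eq_true.mp hany
          have hk : 0 < (c.filter p).length := by
            have hm : a ∈ c.filter p := List.mem_filter.mpr ⟨ha, by simpa using hpa⟩
            exact List.length_pos_of_mem hm
          obtain ⟨j, hj⟩ : ∃ j, (c.filter p).length = j + 1 :=
            ⟨(c.filter p).length - 1, by omega⟩
          have hfirst : dd acc ((List.replicate ((c.filter p).length) c).flatten) = acc ++ c := by
            rw [hj, List.replicate_succ]
            have : (c :: List.replicate j c).flatten = c ++ (List.replicate j c).flatten := by simp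
            rw [this, dd_append, dd_fresh c acc hcnd hdisj,
                dd_rep_stale j c (acc ++ c) (fun v hv => by simp [hv])]
          rw [hfirst]
          have hIH : ((acc ++ c) ++ cs.flatten).Nodup := by
            simpa [List.append_assoc] using hnd'
          rw [ih (acc ++ c) hIH, List.foldl_cons]
          simp only [hany, if_true]
          rw [dd_fresh c acc hcnd hdisj]

-- per-contact: counting matched keys = counting matched values
lemma kc_eq (p : String → Bool) (c : PySem.Dict String String)
    (h : c.keys = ["nombre", "telefono", "email"]) (hn : c.keys.Nodup) :
    ((["nombre", "telefono", "email"] : List String).filter (fun k => p (c.getD k ""))).length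
      = (c.values.filter p).length := by
  rw [PySem.Dict.values_eq_map_keys c hn "", h, List.filter_map, List.length_map]
  rfl

lemma rep_flatMap {α β : Type} (n : Nat) (c : α) (f : α → List β) :
    List.flatMap f (List.replicate n c) = (List.replicate n (f c)).flatten := by
  simp [List.flatMap_def]

theorem browser_spec_aux (word : String) : browser word = browser_alt word := by
  have h : browser word = browser word := rfl
  conv_lhs at h => unfold browser
  simp only [] at h
  rw [foldl_enum0 (fun r (c : PySem.Dict String String) =>
        (["nombre","telefono","email"] : List String).foldl (fun r key =>
          if PySem.Str.isIn (PySem.Str.rstrip (PySem.Str.lstrip (PySem.Str.lower word)))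
              (PySem.Str.lower (c.getD key "")) then r ++ [c] else r) r)
      (PySem.Dict.mk []) contactos []] at h
  dsimp only [] at h
  rw [foldl_enum0 (fun (a : List String) (c : PySem.Dict String String) =>
        c.values.foldl (fun a x => a ++ [x]) a) (PySem.Dict.mk [])
      (List.foldl
        (fun r c =>
          List.foldl
            (fun r key =>
              if PySem.Str.isIn (PySem.Str.rstrip (PySem.Str.lstrip (PySem.Str.lower word)))
                  (PySem.Str.lower (c.getD key "")) = true then r ++ [c] else r)
            r ["nombre", "telefono", "email"])
        [] contactos) []] at h
  dsimp only [] at h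
  simp only [PySem.List.foldl_append_singleton_eq_self, PySem.List.foldl_append_if,
    PySem.List.foldl_append_eq_flatMap, List.nil_append, List.map_const', List.flatMap_assoc,
    rep_flatMap] at h
  rw [List.flatMap_congr (g := fun c =>
        (List.replicate ((c.values.filter (fun v =>
            PySem.Str.isIn (PySem.Str.rstrip (PySem.Str.lstrip (PySem.Str.lower word)))
              (PySem.Str.lower v))).length) c.values).flatten)
      (by
        intro c hc
        have hk : c.keys = ["nombre", "telefono", "email"] := by
          fin_cases hc <;> rfl
        have hn : c.keys.Nodup := by fin_cases hc <;> decide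
        dsimp only []
        rw [kc_eq (fun v => PySem.Str.isIn
            (PySem.Str.rstrip (PySem.Str.lstrip (PySem.Str.lower word)))
            (PySem.Str.lower v)) c hk hn])] at h
  rw [← List.flatMap_map PySem.Dict.values (fun vs =>
        (List.replicate ((vs.filter (fun v =>
            PySem.Str.isIn (PySem.Str.rstrip (PySem.Str.lstrip (PySem.Str.lower word)))
              (PySem.Str.lower v))).length) vs).flatten) contactos] at h
  rw [show (List.foldl (fun f x => if x ∈ f then f else f ++ [x]) [] : List String → List String)
        = dd [] from rfl] at h
  rw [main_dd _ (contactos.map PySem.Dict.values) [] (by decide)] at h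
  rw [← h]
  unfold browser_alt
  rw [strip_eq_lstrip_rstrip, List.foldl_map]
  rfl

-- ===== VERDICT (by name: the statement is the Claim_ definition above) =====
theorem browser_spec : Claim_equal_browser := by
  intro word _
  unfold Spec_browser
  exact browser_spec_aux word
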